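-- pv_equiv track=rewrite | github.com/PeterGrecian/cv | cv.py | group_images_by_4hour_periods
-- ===== SOURCE A (Python) =====
-- def group_images_by_4hour_periods(images):
--     """Group images into 4-hour time periods."""
--     from collections import defaultdict
--
--     periods = defaultdict(list)
--
--     for img in images:
--         # Parse the timestamp to get the hour
--         try:
--             ts = img['timestamp']
--             # Format: YYYY-MM-DD HH:MM:SS
--             date_part = ts.split()[0]
--             hour = int(ts.split()[1].split(':')[0])
--
--             # Calculate 4-hour period (0-3, 4-7, 8-11, 12-15, 16-19, 20-23)
--             period_start = (hour // 4) * 4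
--             period_key = f"{date_part} {period_start:02d}:00-{(period_start+3):02d}:59"
--
--             periods[period_key].append(img)
--         except:
--             periods['Unknown'].append(img)
--
--     # Sort periods in reverse chronological order
--     sorted_periods = sorted(periods.items(), reverse=True)
--     return sorted_periods
-- ===== SOURCE B (Python) =====
-- def _period_key(img):
--     """4-hour period key for one image (same parsing/fallback as the original)."""
--     try:
--         ts = img['timestamp']
--         date_part = ts.split()[0]
--         hour = int(ts.split()[1].split(':')[0])
--         period_start = (hour // 4) * 4
--         return f"{date_part} {period_start:02d}:00-{(period_start+3):02d}:59"
--     except: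
--         return 'Unknown'
--
--
-- def group_images_by_4hour_periods(images):
--     """Group images into 4-hour time periods."""
--     # Tag each image with its key, stable-sort by key descending, then merge
--     # adjacent runs of equal keys in one pass -- no dict needed.
--     pairs = sorted(((_period_key(img), img) for img in images),
--                    key=lambda p: p[0], reverse=True)
--     out = []
--     for k, img in pairs:
--         if out and out[-1][0] == k:
--             out[-1][1].append(img)
--         else:
--             out.append((k, [img]))
--     return out
-- ===== Notes on version B (the rewrite author's own statement) =====
-- stated objective: alternative
-- what changed: Replaces the defaultdict grouping plus a final sort of the items with a dict-free pipeline: tag each image with its period key, stable-sort the (key, image) pairs by key in reverse, and merge adjacent equal-key runs in a single pass.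
import Mathlib
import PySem

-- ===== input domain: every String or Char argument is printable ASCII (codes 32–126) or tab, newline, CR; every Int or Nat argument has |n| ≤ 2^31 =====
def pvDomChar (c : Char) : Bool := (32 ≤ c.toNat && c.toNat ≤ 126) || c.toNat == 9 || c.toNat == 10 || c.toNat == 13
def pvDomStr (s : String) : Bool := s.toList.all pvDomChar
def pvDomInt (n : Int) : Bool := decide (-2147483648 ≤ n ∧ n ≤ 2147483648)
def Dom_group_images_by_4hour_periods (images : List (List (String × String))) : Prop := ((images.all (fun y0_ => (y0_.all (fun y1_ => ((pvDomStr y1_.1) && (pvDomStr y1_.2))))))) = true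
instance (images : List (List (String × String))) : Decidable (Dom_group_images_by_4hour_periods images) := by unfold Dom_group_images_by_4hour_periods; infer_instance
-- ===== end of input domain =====

-- B sort-and-scans instead of building a dict: tag each image with its period key, stable-sort the
-- (key, image) pairs descending, and merge adjacent equal-key runs in one pass (objective: alternative).

-- ===== PORT A =====
-- shared helper: the period key of one image — the body of A's try/except (B's Python has it as the
-- helper _period_key; each 'except: → Unknown' branch is one 'none' case of a PySem primitive)
def pvPeriodKey (img : List (String × String)) : String :=
  match (PySem.Dict.ofList img).get? "timestamp" with
  | none => "Unknown"                                   -- KeyError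
  | some ts =>
    match (PySem.Str.split₀ ts)[0]?, (PySem.Str.split₀ ts)[1]? with
    | some datePart, some hw =>
      match PySem.Str.split? hw ":" with
      | some parts =>
        match PySem.Int.ofStr? (parts.headD "") with    -- parts is never [], headD = parts[0]
        | some hour =>
          let ps := PySem.Int.floordiv hour 4 * 4
          -- f"{date_part} {ps:02d}:00-{ps+3:02d}:59"; {n:02d} = str(n).zfill(2)
          PySem.Str.join "" [datePart, " ", PySem.Str.zfill (PySem.Int.toStr ps) 2, ":00-",
                             PySem.Str.zfill (PySem.Int.toStr (ps + 3)) 2, ":59"]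
        | none => "Unknown"                             -- ValueError from int()
      | none => "Unknown"                               -- unreachable: sep ":" ≠ ""
    | _, _ => "Unknown"                                 -- IndexError on ts.split()
def group_images_by_4hour_periods (images : List (List (String × String))) : List (String × (List (List (String × String)))) :=
  -- periods = the defaultdict(list) loop; sorted(periods.items(), reverse=True): tuples compare
  -- by key first, and dict keys are distinct, so Python never compares the list components —
  -- key-only sort is exact
  PySem.List.sorted
    (images.foldl
      (fun d img => d.modify (pvPeriodKey img) [] (fun l => l ++ [img])) PySem.Dict.empty).items
    (fun p => p.1) true

-- ===== PORT B =====
def pvStep (out : List (String × List (List (String × String))))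
    (p : String × List (String × String)) : List (String × List (List (String × String))) :=
  match out.getLast? with
  | some last => if last.1 == p.1 then out.dropLast ++ [(last.1, last.2 ++ [p.2])]
                 else out ++ [(p.1, [p.2])]
  | none => [(p.1, [p.2])]
def group_images_by_4hour_periods_alt (images : List (List (String × String))) : List (String × (List (List (String × String)))) :=
  -- pairs = the (key, image) list, stable-sorted by key descending; then the adjacent-merge loop
  (PySem.List.sorted (images.map (fun img => (pvPeriodKey img, img))) (fun p => p.1) true).foldl
    pvStep []

-- ===== PRECONDITION & SPEC =====
def Spec_group_images_by_4hour_periods (images : List (List (String × String))) (out : List (String × (List (List (String × String))))) : Prop := out = group_images_by_4hour_periods_alt images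
instance (images : List (List (String × String))) (out : List (String × (List (List (String × String))))) : Decidable (Spec_group_images_by_4hour_periods images out) := by unfold Spec_group_images_by_4hour_periods; infer_instance

-- ===== CLAIM (what is proved, stated in full; the proofs are below) =====
def Claim_equal_group_images_by_4hour_periods : Prop := ∀ (images : List (List (String × String))), Dom_group_images_by_4hour_periods images → Spec_group_images_by_4hour_periods images (group_images_by_4hour_periods images)

-- ===== LEMMAS AND PROOFS =====

-- insertBy (the step of PySem's stable reverse sort) keeps a descending accumulator descending
theorem pv_ins_pairwise {α : Type} (key : α → String) (x : α) (acc : List α)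
    (h : acc.Pairwise (fun a b => key b ≤ key a)) :
    (PySem.List.insertBy (fun a b => decide (key b < key a)) x acc).Pairwise
      (fun a b => key b ≤ key a) := by
  induction acc with
  | nil => simp [PySem.List.insertBy]
  | cons y ys ih =>
    obtain ⟨hy, hys⟩ := List.pairwise_cons.mp h
    by_cases hxy : key y < key x
    · simp only [PySem.List.insertBy, hxy, decide_true, if_true]
      refine List.Pairwise.cons ?_ (List.Pairwise.cons hy hys)
      intro z hz
      rcases List.mem_cons.mp hz with rfl | hz'
      · exact le_of_lt hxy
      · exact (hy z hz').trans (le_of_lt hxy)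
    · simp only [PySem.List.insertBy, hxy, decide_false, Bool.false_eq_true, if_false]
      refine List.Pairwise.cons ?_ (ih hys)
      intro z hz
      rcases (PySem.List.mem_insertBy _ _ _ _).mp hz with rfl | hz'
      · exact not_lt.mp hxy
      · exact hy z hz'

-- inserting into a descending accumulator puts x after every element with its key
theorem pv_ins_filter {α : Type} (key : α → String) (c : String) (x : α) (acc : List α)
    (h : acc.Pairwise (fun a b => key b ≤ key a)) :
    (PySem.List.insertBy (fun a b => decide (key b < key a)) x acc).filter
        (fun a => key a == c)
      = acc.filter (fun a => key a == c) ++ (if key x == c then [x] else []) := by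
  induction acc with
  | nil => cases hc : (key x == c) <;> simp [PySem.List.insertBy, List.filter, hc]
  | cons y ys ih =>
    obtain ⟨hy, hys⟩ := List.pairwise_cons.mp h
    by_cases hxy : key y < key x
    · simp only [PySem.List.insertBy, hxy, decide_true, if_true]
      by_cases hxc : key x = c
      · have hnil : (y :: ys).filter (fun a => key a == c) = [] := by
          rw [List.filter_eq_nil_iff]
          intro z hz
          have hzy : key z ≤ key y := by
            rcases List.mem_cons.mp hz with rfl | hz'
            · exact le_rfl
            · exact hy z hz'
          have : key z < c := hxc ▸ lt_of_le_of_lt hzy hxy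
          simp [ne_of_lt this]
        rw [List.filter_cons, hnil]
        simp [hxc]
      · have hfx : (key x == c) = false := by simp [hxc]
        rw [List.filter_cons, hfx]
        simp
    · simp only [PySem.List.insertBy, hxy, decide_false, Bool.false_eq_true, if_false]
      rw [List.filter_cons, List.filter_cons, ih hys]
      cases hyc : (key y == c) <;> simp [hyc]

theorem pv_foldl_ins_filter {α : Type} (key : α → String) (c : String) (xs : List α)
    (acc : List α) (h : acc.Pairwise (fun a b => key b ≤ key a)) :
    (xs.foldl (fun acc x => PySem.List.insertBy (fun a b => decide (key b < key a)) x acc)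
        acc).filter (fun a => key a == c)
      = acc.filter (fun a => key a == c) ++ xs.filter (fun a => key a == c) := by
  induction xs generalizing acc with
  | nil => simp
  | cons x xs ih =>
    simp only [List.foldl_cons]
    rw [ih _ (pv_ins_pairwise key x acc h), pv_ins_filter key c x acc h, List.filter_cons]
    cases hc : (key x == c) <;> simp [hc]

-- stability of the reverse sort, as a filter statement
theorem pv_sorted_rev_filter {α : Type} (key : α → String) (c : String) (xs : List α) :
    (PySem.List.sorted xs key true).filter (fun a => key a == c)
      = xs.filter (fun a => key a == c) := by
  rw [PySem.List.sorted_rev_eq_foldl_insertBy]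
  simpa using pv_foldl_ins_filter key c xs [] (by simp)

theorem pv_sorted_rev_filter_pairs {b : Type} (c : String) (xs : List (String × b)) :
    (PySem.List.sorted xs (fun p => p.1) true).filter (fun q => q.1 == c)
      = xs.filter (fun q => q.1 == c) :=
  pv_sorted_rev_filter (fun p => p.1) c xs

-- a minimum that occurs in a descending list is its last element
theorem pv_last_of_min (m : List String) (a : String)
    (hm : m.Pairwise (fun x y => y ≤ x)) (ha : a ∈ m) (hall : ∀ x ∈ m, a ≤ x) :
    m.getLast? = some a := by
  induction m with
  | nil => cases ha
  | cons b t ih =>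
    obtain ⟨hb, ht⟩ := List.pairwise_cons.mp hm
    cases t with
    | nil =>
      simp only [List.mem_singleton] at ha
      simp [ha]
    | cons u v =>
      rw [List.getLast?_cons_cons]
      refine ih ht ?_ (fun x hx => hall x (List.mem_cons_of_mem _ hx))
      rcases List.mem_cons.mp ha with rfl | h2
      · have hub : u ≤ a := hb u (by simp)
        have hau : a ≤ u := hall u (by simp [List.mem_cons])
        have : u = a := le_antisymm hub hau
        exact this ▸ List.mem_cons_self
      · exact h2

theorem pv_ofList_append (m : List String) (a : String) :
    PySem.Set.ofList (m ++ [a])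
      = if a ∈ m then PySem.Set.ofList m else PySem.Set.ofList m ++ [a] := by
  rw [PySem.Set.ofList_eq_foldl, List.foldl_append,
    ← PySem.Set.ofList_eq_foldl]
  show PySem.Set.add (PySem.Set.ofList m) a = _
  by_cases hmem : a ∈ m
  · have : a ∈ PySem.Set.ofList m := (PySem.Set.mem_ofList m a).mpr hmem
    simp [PySem.Set.add, PySem.Set.contains, this, hmem]
  · have : a ∉ PySem.Set.ofList m := fun hc => hmem ((PySem.Set.mem_ofList m a).mp hc)
    simp [PySem.Set.add, PySem.Set.contains, this, hmem]

theorem pv_ofList_sublist (m : List String) : (PySem.Set.ofList m).Sublist m := by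
  induction m using List.reverseRecOn with
  | nil => simp [PySem.Set.ofList, PySem.Set.empty]
  | append_singleton m a ih =>
    rw [pv_ofList_append]
    split_ifs with hmem
    · exact ih.trans (List.sublist_append_left m [a])
    · exact ih.append (List.Sublist.refl [a])

theorem pv_ofList_getLast (m : List String) (hm : m.Pairwise (fun x y => y ≤ x)) :
    (PySem.Set.ofList m).getLast? = m.getLast? := by
  induction m using List.reverseRecOn with
  | nil => rfl
  | append_singleton m a ih =>
    have hm' : m.Pairwise (fun x y => y ≤ x) :=
      List.Pairwise.sublist (List.sublist_append_left m [a]) hm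
    rw [pv_ofList_append]
    split_ifs with hmem
    · have hall : ∀ x ∈ m, a ≤ x := by
        have hcross := (List.pairwise_append.mp hm).2.2
        exact fun x hx => hcross x hx a (by simp)
      rw [ih hm', pv_last_of_min m a hm' hmem hall, List.getLast?_concat]
    · rw [List.getLast?_concat, List.getLast?_concat]

-- the adjacent-merge pass on a key-descending pair list produces one entry per distinct key,
-- carrying that key's images in order
theorem pv_groupfold (L : List (String × List (String × String)))
    (h : (L.map Prod.fst).Pairwise (fun a b => b ≤ a)) :
    L.foldl pvStep []
      = (PySem.Set.ofList (L.map Prod.fst)).map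
          (fun k => (k, (L.filter (fun q => q.1 == k)).map Prod.snd)) := by
  induction L using List.reverseRecOn with
  | nil => simp [PySem.Set.ofList, PySem.Set.empty]
  | append_singleton L p ih =>
    rw [List.map_append, List.map_cons, List.map_nil] at h
    have hdesc : (L.map Prod.fst).Pairwise (fun a b => b ≤ a) :=
      List.Pairwise.sublist (List.sublist_append_left _ _) h
    have hple : ∀ x ∈ L.map Prod.fst, p.1 ≤ x := by
      have hcross := (List.pairwise_append.mp h).2.2
      exact fun x hx => hcross x hx p.1 (by simp)
    rw [List.foldl_append, ih hdesc, List.foldl_cons, List.foldl_nil]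
    rw [List.map_append, List.map_cons, List.map_nil, pv_ofList_append]
    cases hL : (L.map Prod.fst).getLast? with
    | none =>
      have hLnil : L = [] := by
        have := List.getLast?_eq_none_iff.mp hL
        exact List.map_eq_nil_iff.mp this
      subst hLnil
      simp [pvStep, PySem.Set.ofList, PySem.Set.empty]
    | some kl =>
      have hDlast : (PySem.Set.ofList (L.map Prod.fst)).getLast? = some kl := by
        rw [pv_ofList_getLast _ hdesc, hL]
      obtain ⟨D', hD'⟩ := List.getLast?_eq_some_iff.mp hDlast
      have hklmem : kl ∈ L.map Prod.fst := by
        obtain ⟨l', hl'⟩ := List.getLast?_eq_some_iff.mp hL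
        rw [hl']; simp
      have hndD : (PySem.Set.ofList (L.map Prod.fst)).Nodup := PySem.Set.nodup_ofList _
      have hD'ne : ∀ k ∈ D', k ≠ kl := by
        rw [hD'] at hndD
        intro k hk rfl
        exact (List.disjoint_of_nodup_append hndD) hk (by simp)
      have hcanlast :
          ((PySem.Set.ofList (L.map Prod.fst)).map
            (fun k => (k, (L.filter (fun q => q.1 == k)).map Prod.snd))).getLast?
          = some (kl, (L.filter (fun q => q.1 == kl)).map Prod.snd) := by
        rw [List.getLast?_map, hDlast]; rfl
      by_cases hk : p.1 = kl
      · -- p extends the last (minimal-key) group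
        have hmem : p.1 ∈ L.map Prod.fst := hk ▸ hklmem
        rw [if_pos hmem]
        unfold pvStep
        rw [hcanlast]
        simp only [hk, beq_self_eq_true, if_true]
        rw [hD', List.map_append, List.map_cons, List.map_nil, List.dropLast_concat,
          List.map_append, List.map_cons, List.map_nil]
        congr 1
        · refine List.map_congr_left (fun k hkD => ?_)
          have hne : (p.1 == k) = false := by
            simp only [beq_eq_false_iff_ne, ne_eq]
            exact fun hc => (hD'ne k hkD) (hc ▸ hk)
          rw [List.filter_append, List.filter_cons, List.filter_nil, hne]
          simp
        · rw [List.filter_append, List.filter_cons, List.filter_nil]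
          have : (p.1 == kl) = true := by simp [hk]
          rw [this]
          simp [hk]
      · -- p starts a new group with a strictly smaller key
        have hnotmem : p.1 ∉ L.map Prod.fst := by
          intro hmem
          have hlast := pv_last_of_min (L.map Prod.fst) p.1 hdesc hmem hple
          rw [hlast] at hL
          exact hk (Option.some.inj hL)
        rw [if_neg hnotmem]
        unfold pvStep
        rw [hcanlast]
        have hklp : (kl == p.1) = false := by
          simp only [beq_eq_false_iff_ne, ne_eq]; exact fun hc => hk hc.symm
        simp only [hklp, Bool.false_eq_true, if_false]
        rw [List.map_append, List.map_cons, List.map_nil]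
        congr 1
        · refine List.map_congr_left (fun k hkD => ?_)
          have hkL : k ∈ L.map Prod.fst := (PySem.Set.mem_ofList _ _).mp hkD
          have hne : (p.1 == k) = false := by
            simp only [beq_eq_false_iff_ne, ne_eq]
            exact fun hc => hnotmem (hc ▸ hkL)
          rw [List.filter_append, List.filter_cons, List.filter_nil, hne]
          simp
        · have hnil : L.filter (fun q => q.1 == p.1) = [] := by
            rw [List.filter_eq_nil_iff]
            intro q hq hc
            exact hnotmem ((beq_iff_eq.mp hc) ▸ List.mem_map_of_mem hq)
          rw [List.filter_append, List.filter_cons, List.filter_nil, hnil]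
          simp

-- ===== VERDICT (by name: the statement is the Claim_ definition above) =====
theorem group_images_by_4hour_periods_spec : Claim_equal_group_images_by_4hour_periods := by
  intro images _
  unfold Spec_group_images_by_4hour_periods
  unfold group_images_by_4hour_periods group_images_by_4hour_periods_alt
  set P : List (String × List (String × String))
    := images.map (fun img => (pvPeriodKey img, img)) with hP
  have hfold :
      images.foldl (fun d img => d.modify (pvPeriodKey img) [] (fun l => l ++ [img]))
          PySem.Dict.empty
        = P.foldl (fun d p => d.modify p.1 [] (fun l => l ++ [p.2])) PySem.Dict.empty := by
    rw [hP, List.foldl_map]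
  rw [hfold]
  have hnd : (P.foldl (fun d p => d.modify p.1 [] (fun l => l ++ [p.2]))
      PySem.Dict.empty).keys.Nodup :=
    PySem.Dict.nodup_keys_foldl_modify_key P Prod.fst [] (fun _ p => fun l => l ++ [p.2])
      PySem.Dict.empty PySem.Dict.nodup_keys_empty
  have hkeys : (P.foldl (fun d p => d.modify p.1 [] (fun l => l ++ [p.2]))
      PySem.Dict.empty).keys = PySem.Set.ofList (P.map Prod.fst) := by
    rw [PySem.Dict.keys_foldl_modify_key P Prod.fst [] (fun _ p => fun l => l ++ [p.2])
      PySem.Dict.empty]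
    rfl
  have hgetD : ∀ k, (P.foldl (fun d p => d.modify p.1 [] (fun l => l ++ [p.2]))
      PySem.Dict.empty).getD k [] = (P.filter (fun q => q.1 == k)).map Prod.snd := by
    intro k
    have h1 := PySem.Dict.getD_foldl_modify_append P PySem.Dict.empty k
    simpa [PySem.Dict.getD_empty] using h1
  have hitems : (P.foldl (fun d p => d.modify p.1 [] (fun l => l ++ [p.2]))
        PySem.Dict.empty).items
      = (PySem.Set.ofList (P.map Prod.fst)).map
          (fun k => (k, (P.filter (fun q => q.1 == k)).map Prod.snd)) := by
    rw [PySem.Dict.items_eq_map_keys _ hnd [], hkeys]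
    exact List.map_congr_left (fun k _ => by rw [hgetD k])
  rw [hitems]
  set S : List (String × List (String × String))
    := PySem.List.sorted P (fun p => p.1) true with hS
  have hSdesc : (S.map Prod.fst).Pairwise (fun a b => b ≤ a) := by
    rw [List.pairwise_map]
    exact PySem.List.sorted_pairwise_rev P (fun p => p.1)
  have hB : S.foldl pvStep []
      = (PySem.Set.ofList (S.map Prod.fst)).map
          (fun k => (k, (P.filter (fun q => q.1 == k)).map Prod.snd)) := by
    rw [pv_groupfold S hSdesc]
    refine List.map_congr_left (fun k _ => ?_)
    rw [hS, pv_sorted_rev_filter_pairs k P]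
  rw [hB]
  apply PySem.List.sorted_rev_eq_of_perm_of_pairwise_gt
  · refine List.Perm.map _ ?_
    rw [List.perm_ext_iff_of_nodup (PySem.Set.nodup_ofList _) (PySem.Set.nodup_ofList _)]
    intro a
    rw [PySem.Set.mem_ofList, PySem.Set.mem_ofList]
    exact ((PySem.List.sorted_perm P (fun p => p.1) true).map Prod.fst).mem_iff
  · rw [List.pairwise_map]
    have hle : (PySem.Set.ofList (S.map Prod.fst)).Pairwise (fun a b => b ≤ a) :=
      List.Pairwise.sublist (pv_ofList_sublist _) hSdesc
    have hne : (PySem.Set.ofList (S.map Prod.fst)).Pairwise (fun a b => a ≠ b) :=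
      PySem.Set.nodup_ofList _
    exact (hle.and hne).imp (fun hab => lt_of_le_of_ne hab.1 (Ne.symm hab.2))
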